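-- pv_equiv track=rewrite | github.com/looooopiii/Tooth-Presence-Classification | week2/build_dataset_baseline.py | extract_32bit_presence
-- ===== SOURCE A (Python) =====
-- def extract_32bit_presence(label_array, jaw):
--     # Extraction of 32-bit presence vectors from upper and lower teeth (FDI coding to 1~32)
--     if jaw == "upper":
--         FDI_TO_INDEX = {
--             18: 1, 17: 2, 16: 3, 15: 4, 14: 5, 13: 6, 12: 7, 11: 8,
--             21: 9, 22: 10, 23: 11, 24: 12, 25: 13, 26: 14, 27: 15, 28: 16
--         }
--     elif jaw == "lower":
--         FDI_TO_INDEX = {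
--             38: 17, 37: 18, 36: 19, 35: 20, 34: 21, 33: 22, 32: 23, 31: 24,
--             41: 25, 42: 26, 43: 27, 44: 28, 45: 29, 46: 30, 47: 31, 48: 32
--         }
--     else:
--         raise ValueError("Invalid jaw type")
--
--     presence = [0] * 32
--     for fdi in label_array:
--         if fdi in FDI_TO_INDEX:
--             presence[FDI_TO_INDEX[fdi] - 1] = 1
--     return presence
-- ===== SOURCE B (Python) =====
-- # B: build the 32-vector positionally from the fixed FDI orderings, using a set of the labels,
-- # instead of scatter-writing into a zero vector while scanning the labels.
--
-- _UPPER_FDIS = [18, 17, 16, 15, 14, 13, 12, 11, 21, 22, 23, 24, 25, 26, 27, 28]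
-- _LOWER_FDIS = [38, 37, 36, 35, 34, 33, 32, 31, 41, 42, 43, 44, 45, 46, 47, 48]
--
--
-- def extract_32bit_presence(label_array, jaw):
--     if jaw not in ("upper", "lower"):
--         raise ValueError("Invalid jaw type")
--     present = set(label_array)
--     half = [1 if fdi in present else 0
--             for fdi in (_UPPER_FDIS if jaw == "upper" else _LOWER_FDIS)]
--     zeros = [0] * 16
--     return half + zeros if jaw == "upper" else zeros + half
-- ===== Notes on version B (the rewrite author's own statement) =====
-- stated objective: alternative
-- what changed: Instead of scatter-writing 1s into a zero vector while scanning the labels through the FDI dict, B builds the 32-entry vector positionally: one comprehension over the fixed 16-slot FDI ordering testing membership in set(label_array), concatenated with the 16 zeros of the other jaw.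
import Mathlib
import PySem

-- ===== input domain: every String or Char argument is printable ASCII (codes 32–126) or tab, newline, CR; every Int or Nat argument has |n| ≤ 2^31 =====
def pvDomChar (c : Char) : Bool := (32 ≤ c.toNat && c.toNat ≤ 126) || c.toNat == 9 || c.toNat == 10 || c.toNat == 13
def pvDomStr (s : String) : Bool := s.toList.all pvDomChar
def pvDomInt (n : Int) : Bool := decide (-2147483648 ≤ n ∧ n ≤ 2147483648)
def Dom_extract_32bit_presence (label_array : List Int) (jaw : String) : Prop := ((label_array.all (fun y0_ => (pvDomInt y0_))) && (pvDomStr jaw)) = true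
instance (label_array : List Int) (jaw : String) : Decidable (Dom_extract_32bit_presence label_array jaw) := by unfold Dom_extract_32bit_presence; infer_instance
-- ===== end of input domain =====

-- B builds the 32-vector positionally from the fixed FDI orderings with a membership set,
-- instead of A's scatter-writes into a zero vector while scanning the labels (objective: alternative).

-- ===== PORT A =====
def pvUpperDict : PySem.Dict Int Int :=
  PySem.Dict.mk [(18, 1), (17, 2), (16, 3), (15, 4), (14, 5), (13, 6), (12, 7), (11, 8),
                 (21, 9), (22, 10), (23, 11), (24, 12), (25, 13), (26, 14), (27, 15), (28, 16)]

def pvLowerDict : PySem.Dict Int Int :=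
  PySem.Dict.mk [(38, 17), (37, 18), (36, 19), (35, 20), (34, 21), (33, 22), (32, 23), (31, 24),
                 (41, 25), (42, 26), (43, 27), (44, 28), (45, 29), (46, 30), (47, 31), (48, 32)]

def extract_32bit_presence (label_array : List Int) (jaw : String) : List Int :=
  match (if jaw == "upper" then some pvUpperDict
         else if jaw == "lower" then some pvLowerDict
         else none) with                                  -- none = raise ValueError (excluded by Pre_)
  | none => []
  | some tbl =>
      label_array.foldl
        (fun presence fdi =>
          match tbl.get? fdi with                          -- 'if fdi in FDI_TO_INDEX'
          | some idx => presence.set (idx - 1).toNat 1     -- 'presence[FDI_TO_INDEX[fdi] - 1] = 1'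
          | none => presence)
        (List.replicate 32 0)

-- ===== PORT B =====
def pvUpperFDIs : List Int := [18, 17, 16, 15, 14, 13, 12, 11, 21, 22, 23, 24, 25, 26, 27, 28]
def pvLowerFDIs : List Int := [38, 37, 36, 35, 34, 33, 32, 31, 41, 42, 43, 44, 45, 46, 47, 48]

def extract_32bit_presence_alt (label_array : List Int) (jaw : String) : List Int :=
  if jaw == "upper" || jaw == "lower" then
    let present : PySem.Set Int := PySem.Set.ofList label_array
    let half := (if jaw == "upper" then pvUpperFDIs else pvLowerFDIs).map
      (fun fdi => if PySem.Set.contains present fdi then (1 : Int) else 0)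
    if jaw == "upper" then half ++ List.replicate 16 0 else List.replicate 16 0 ++ half
  else []                                                 -- raise ValueError (excluded by Pre_)

-- ===== PRECONDITION & SPEC =====
-- A raises ValueError for any jaw other than "upper"/"lower"; exactly those inputs are excluded.
def Pre_extract_32bit_presence (label_array : List Int) (jaw : String) : Prop :=
  jaw = "upper" ∨ jaw = "lower"
instance (label_array : List Int) (jaw : String) : Decidable (Pre_extract_32bit_presence label_array jaw) := by
  unfold Pre_extract_32bit_presence; infer_instance

def pvWitness_extract_32bit_presence : List Int × String := ([18, 44, 25], "upper")

def Spec_extract_32bit_presence (label_array : List Int) (jaw : String) (out : List Int) : Prop := out = extract_32bit_presence_alt label_array jaw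
instance (label_array : List Int) (jaw : String) (out : List Int) : Decidable (Spec_extract_32bit_presence label_array jaw out) := by unfold Spec_extract_32bit_presence; infer_instance

-- ===== CLAIM (what is proved, stated in full; the proofs are below) =====
def Claim_equal_extract_32bit_presence : Prop := ∀ (label_array : List Int) (jaw : String), Dom_extract_32bit_presence label_array jaw → Pre_extract_32bit_presence label_array jaw → Spec_extract_32bit_presence label_array jaw (extract_32bit_presence label_array jaw)

-- ===== LEMMAS AND PROOFS =====

-- A's loop body preserves the vector length.
lemma pv_fold_length (tbl : PySem.Dict Int Int) (labels : List Int) (init : List Int) :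
    (labels.foldl
      (fun presence fdi =>
        match tbl.get? fdi with
        | some idx => presence.set (idx - 1).toNat 1
        | none => presence) init).length = init.length := by
  induction labels generalizing init with
  | nil => rfl
  | cons a l ih =>
      cases h : tbl.get? a with
      | none => simp only [List.foldl_cons, h]; exact ih init
      | some idx =>
          simp only [List.foldl_cons, h]
          rw [ih, List.length_set]

-- Pointwise value of A's fold: position i ends at 1 iff some label looks up to index i+1.
lemma pv_fold_getD (tbl : PySem.Dict Int Int)
    (hval : ∀ f v, tbl.get? f = some v → 1 ≤ v)
    (labels : List Int) (init : List Int) (i : Nat) :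
    (labels.foldl
      (fun presence fdi =>
        match tbl.get? fdi with
        | some idx => presence.set (idx - 1).toNat 1
        | none => presence) init).getD i 0 =
      if labels.any (fun f => tbl.get? f == some ((i : Int) + 1)) then
        (if i < init.length then 1 else 0)
      else init.getD i 0 := by
  induction labels generalizing init with
  | nil => simp
  | cons a l ih =>
      cases h : tbl.get? a with
      | none =>
          simp only [List.foldl_cons, List.any_cons, h]
          rw [ih]
          simp
      | some v =>
          have hv1 : 1 ≤ v := hval a v h
          simp only [List.foldl_cons, List.any_cons, h]
          rw [ih, List.length_set]
          by_cases hvi : v = (i : Int) + 1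
          · have hpos : (v - 1).toNat = i := by omega
            by_cases hilt : i < init.length
            · have hone : (init.set (v - 1).toNat 1).getD i 0 = 1 := by
                rw [List.getD_eq_getElem?_getD, hpos, List.getElem?_set_self hilt]; rfl
              simp [hvi, hilt]
            · have h0 : init.getD i 0 = 0 := by
                rw [List.getD_eq_getElem?_getD, List.getElem?_eq_none (by omega : init.length ≤ i)]; rfl
              have h0' : (init.set (v - 1).toNat 1).getD i 0 = 0 := by
                rw [List.getD_eq_getElem?_getD, hpos,
                    List.getElem?_eq_none (by simpa using (by omega : init.length ≤ i))]; rfl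
              simp [hvi, hilt]
          · have hne : (v - 1).toNat ≠ i := by omega
            have hset : (init.set (v - 1).toNat 1).getD i 0 = init.getD i 0 := by
              rw [List.getD_eq_getElem?_getD, List.getElem?_set_ne hne, ← List.getD_eq_getElem?_getD]
            have hbeq : (some v == some ((i : Int) + 1)) = false := by
              simpa using hvi
            rw [hbeq]
            simp only [Bool.false_or]
            rw [hset]

-- every value stored in the literal dicts is ≥ 1 and within its jaw's index range
lemma pv_upper_val {f v : Int} (h : pvUpperDict.get? f = some v) : 1 ≤ v ∧ v ≤ 16 := by
  have hm : (f, v) ∈ pvUpperDict.items :=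
    PySem.Dict.mem_items_of_get?_eq_some _ h
  simp only [pvUpperDict] at hm
  simp only [List.mem_cons, List.not_mem_nil, or_false, Prod.mk.injEq] at hm
  omega

lemma pv_lower_val {f v : Int} (h : pvLowerDict.get? f = some v) : 17 ≤ v ∧ v ≤ 32 := by
  have hm : (f, v) ∈ pvLowerDict.items :=
    PySem.Dict.mem_items_of_get?_eq_some _ h
  simp only [pvLowerDict] at hm
  simp only [List.mem_cons, List.not_mem_nil, or_false, Prod.mk.injEq] at hm
  omega

-- the literal lookup, characterised: value i+1 is hit exactly by key pvUpperFDIs[i]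
lemma pv_upper_key (i : Nat) (hi : i < 16) (f : Int) :
    (pvUpperDict.get? f = some ((i : Int) + 1)) ↔ f = pvUpperFDIs.getD i 0 := by
  have hnd : pvUpperDict.keys.Nodup := by decide
  rw [PySem.Dict.get?_eq_some_iff_mem_items _ _ _ hnd]
  simp only [pvUpperDict, pvUpperFDIs]
  interval_cases i <;> simp

lemma pv_lower_key (i : Nat) (hi : 16 ≤ i) (hi' : i < 32) (f : Int) :
    (pvLowerDict.get? f = some ((i : Int) + 1)) ↔ f = pvLowerFDIs.getD (i - 16) 0 := by
  have hnd : pvLowerDict.keys.Nodup := by decide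
  rw [PySem.Dict.get?_eq_some_iff_mem_items _ _ _ hnd]
  simp only [pvLowerDict, pvLowerFDIs]
  interval_cases i <;> simp

-- membership-test bridge: B's set test is list membership
lemma pv_set_contains (labels : List Int) (c : Int) :
    PySem.Set.contains (PySem.Set.ofList labels) c = true ↔ c ∈ labels := by
  rw [PySem.Set.contains_iff, PySem.Set.mem_ofList]

lemma pv_any_eq_mem (tbl : PySem.Dict Int Int) (labels : List Int) (i : Nat) (c : Int)
    (hkey : ∀ f, tbl.get? f = some ((i : Int) + 1) ↔ f = c) :
    (labels.any (fun f => tbl.get? f == some ((i : Int) + 1))) = true ↔ c ∈ labels := by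
  simp only [List.any_eq_true, beq_iff_eq]
  constructor
  · rintro ⟨f, hf, hlook⟩; rw [hkey f] at hlook; exact hlook ▸ hf
  · intro hc; exact ⟨c, hc, (hkey c).mpr rfl⟩

lemma pv_any_false (tbl : PySem.Dict Int Int) (labels : List Int) (i : Nat)
    (hno : ∀ f, tbl.get? f ≠ some ((i : Int) + 1)) :
    (labels.any (fun f => tbl.get? f == some ((i : Int) + 1))) = false := by
  simp only [List.any_eq_false]
  intro f _
  simpa using hno f

-- per-jaw equivalence
lemma pv_upper_main (labels : List Int) :
    extract_32bit_presence labels "upper" = extract_32bit_presence_alt labels "upper" := by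
  have hA : extract_32bit_presence labels "upper" =
      labels.foldl
        (fun presence fdi =>
          match pvUpperDict.get? fdi with
          | some idx => presence.set (idx - 1).toNat 1
          | none => presence)
        (List.replicate 32 (0 : Int)) := rfl
  have hB : extract_32bit_presence_alt labels "upper" =
      (pvUpperFDIs.map
        (fun fdi => if PySem.Set.contains (PySem.Set.ofList labels) fdi then (1 : Int) else 0))
        ++ List.replicate 16 0 := rfl
  rw [hA, hB]
  have hval : ∀ f v, pvUpperDict.get? f = some v → 1 ≤ v := fun f v h => (pv_upper_val h).1
  apply List.ext_getElem
  · rw [pv_fold_length]; simp [pvUpperFDIs]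
  intro i h1 h2
  rw [pv_fold_length, List.length_replicate] at h1
  rw [← List.getD_eq_getElem _ 0]
  rw [pv_fold_getD pvUpperDict hval labels (List.replicate 32 0) i]
  simp only [List.length_replicate, if_pos h1]
  by_cases hi16 : i < 16
  · have hlt : i < (pvUpperFDIs.map
        (fun fdi => if PySem.Set.contains (PySem.Set.ofList labels) fdi then (1 : Int) else 0)).length := by
      simp [pvUpperFDIs]; omega
    rw [List.getElem_append_left hlt, List.getElem_map]
    have hidx : pvUpperFDIs[i]'(by simp [pvUpperFDIs]; omega) = pvUpperFDIs.getD i 0 :=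
      (List.getD_eq_getElem _ 0 (by simp [pvUpperFDIs]; omega)).symm
    rw [hidx]
    have hany : (labels.any (fun f => pvUpperDict.get? f == some ((i : Int) + 1)))
        = PySem.Set.contains (PySem.Set.ofList labels) (pvUpperFDIs.getD i 0) := by
      rw [Bool.eq_iff_iff, pv_any_eq_mem _ _ _ _ (pv_upper_key i hi16), pv_set_contains]
    rw [hany]
    by_cases hc : PySem.Set.contains (PySem.Set.ofList labels) (pvUpperFDIs.getD i 0) = true
    · rw [if_pos hc, if_pos hc]
    · rw [if_neg hc, if_neg hc]
      rw [List.getD_eq_getElem?_getD, List.getElem?_replicate, if_pos h1]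
      rfl
  · have hge : (pvUpperFDIs.map
        (fun fdi => if PySem.Set.contains (PySem.Set.ofList labels) fdi then (1 : Int) else 0)).length ≤ i := by
      simp [pvUpperFDIs]; omega
    rw [List.getElem_append_right hge, List.getElem_replicate]
    have hno : ∀ f, pvUpperDict.get? f ≠ some ((i : Int) + 1) := by
      intro f hcontr
      have := (pv_upper_val hcontr).2
      omega
    rw [pv_any_false _ _ _ hno]
    rw [List.getD_eq_getElem?_getD, List.getElem?_replicate, if_pos h1]
    rfl

lemma pv_lower_main (labels : List Int) :
    extract_32bit_presence labels "lower" = extract_32bit_presence_alt labels "lower" := by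
  have hA : extract_32bit_presence labels "lower" =
      labels.foldl
        (fun presence fdi =>
          match pvLowerDict.get? fdi with
          | some idx => presence.set (idx - 1).toNat 1
          | none => presence)
        (List.replicate 32 (0 : Int)) := rfl
  have hB : extract_32bit_presence_alt labels "lower" =
      List.replicate 16 0 ++
      (pvLowerFDIs.map
        (fun fdi => if PySem.Set.contains (PySem.Set.ofList labels) fdi then (1 : Int) else 0)) := rfl
  rw [hA, hB]
  have hval : ∀ f v, pvLowerDict.get? f = some v → 1 ≤ v := fun f v h => by
    have := (pv_lower_val h).1; omega
  apply List.ext_getElem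
  · rw [pv_fold_length]; simp [pvLowerFDIs]
  intro i h1 h2
  rw [pv_fold_length, List.length_replicate] at h1
  rw [← List.getD_eq_getElem _ 0]
  rw [pv_fold_getD pvLowerDict hval labels (List.replicate 32 0) i]
  simp only [List.length_replicate, if_pos h1]
  by_cases hi16 : i < 16
  · rw [List.getElem_append_left (show i < (List.replicate 16 (0 : Int)).length by simpa using hi16)]
    rw [List.getElem_replicate]
    have hno : ∀ f, pvLowerDict.get? f ≠ some ((i : Int) + 1) := by
      intro f hcontr
      have := (pv_lower_val hcontr).1
      omega
    rw [pv_any_false _ _ _ hno]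
    rw [List.getD_eq_getElem?_getD, List.getElem?_replicate, if_pos h1]
    rfl
  · have hge : (List.replicate 16 (0 : Int)).length ≤ i := by simp; omega
    rw [List.getElem_append_right hge, List.getElem_map]
    have hlt' : i - (List.replicate 16 (0 : Int)).length < pvLowerFDIs.length := by
      simp [pvLowerFDIs]; omega
    have hidx : pvLowerFDIs[i - (List.replicate 16 (0 : Int)).length]'(by
          simp only [List.length_replicate]
          simp [pvLowerFDIs]; omega) = pvLowerFDIs.getD (i - 16) 0 := by
      simp only [List.length_replicate]
      exact (List.getD_eq_getElem _ 0 (by simp [pvLowerFDIs]; omega)).symm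
    rw [hidx]
    have hany : (labels.any (fun f => pvLowerDict.get? f == some ((i : Int) + 1)))
        = PySem.Set.contains (PySem.Set.ofList labels) (pvLowerFDIs.getD (i - 16) 0) := by
      rw [Bool.eq_iff_iff, pv_any_eq_mem _ _ _ _ (pv_lower_key i (by omega) (by omega)),
          pv_set_contains]
    rw [hany]
    by_cases hc : PySem.Set.contains (PySem.Set.ofList labels) (pvLowerFDIs.getD (i - 16) 0) = true
    · rw [if_pos hc, if_pos hc]
    · rw [if_neg hc, if_neg hc]
      rw [List.getD_eq_getElem?_getD, List.getElem?_replicate, if_pos h1]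
      rfl

-- ===== VERDICT (by name: the statement is the Claim_ definition above) =====
theorem extract_32bit_presence_spec : Claim_equal_extract_32bit_presence := by
  intro labels jaw _ hpre
  unfold Spec_extract_32bit_presence
  rcases hpre with h | h <;> subst h
  · exact pv_upper_main labels
  · exact pv_lower_main labels
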